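-- pv_equiv track=rewrite | github.com/rakesh-killamsetty/packaged-food-rating-app | modules/medical_llm_service.py | _analyze_nutrients
-- ===== SOURCE A (Python) =====
-- from typing import Dict, List, Optional, Any
--
-- def _analyze_nutrients(nutrition_facts: Dict[str, Any]) -> Dict[str, str]:
--     """
--     Analyze individual nutrients
--     """
--     analysis = {}
--
--     for nutrient, value in nutrition_facts.items():
--         if "sodium" in nutrient.lower():
--             analysis[nutrient] = "Essential for fluid balance, but excess can cause hypertension"
--         elif "sugar" in nutrient.lower():
--             analysis[nutrient] = "Provides energy but excess can lead to diabetes and obesity"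
--         elif "protein" in nutrient.lower():
--             analysis[nutrient] = "Essential for muscle and tissue repair"
--         elif "fiber" in nutrient.lower():
--             analysis[nutrient] = "Important for digestive health and cholesterol management"
--         else:
--             analysis[nutrient] = "Important for overall health and nutrition"
--
--     return analysis
-- ===== SOURCE B (Python) =====
-- RULES = [
--     ("sodium", "Essential for fluid balance, but excess can cause hypertension"),
--     ("sugar", "Provides energy but excess can lead to diabetes and obesity"),
--     ("protein", "Essential for muscle and tissue repair"),
--     ("fiber", "Important for digestive health and cholesterol management"),
-- ]
-- DEFAULT = "Important for overall health and nutrition"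
--
-- def _analyze_nutrients(nutrition_facts):
--     # Paint-and-overwrite: start everything at the default, then sweep the
--     # keyword rules in reverse priority order; each sweep overwrites matching
--     # entries, so the final (highest-priority) sweep wins.
--     analysis = dict.fromkeys(nutrition_facts, DEFAULT)
--     for kw, msg in reversed(RULES):
--         for name in analysis:
--             if kw in name.lower():
--                 analysis[name] = msg
--     return analysis
-- ===== Notes on version B (the rewrite author's own statement) =====
-- stated objective: alternative
-- what changed: B replaces A's per-key if/elif first-match classification with keyword-major staged painting: it initializes every nutrient to the default message, then makes one sweep per keyword in reverse priority order, overwriting matching entries so the highest-priority keyword's sweep wins.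
import Mathlib
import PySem

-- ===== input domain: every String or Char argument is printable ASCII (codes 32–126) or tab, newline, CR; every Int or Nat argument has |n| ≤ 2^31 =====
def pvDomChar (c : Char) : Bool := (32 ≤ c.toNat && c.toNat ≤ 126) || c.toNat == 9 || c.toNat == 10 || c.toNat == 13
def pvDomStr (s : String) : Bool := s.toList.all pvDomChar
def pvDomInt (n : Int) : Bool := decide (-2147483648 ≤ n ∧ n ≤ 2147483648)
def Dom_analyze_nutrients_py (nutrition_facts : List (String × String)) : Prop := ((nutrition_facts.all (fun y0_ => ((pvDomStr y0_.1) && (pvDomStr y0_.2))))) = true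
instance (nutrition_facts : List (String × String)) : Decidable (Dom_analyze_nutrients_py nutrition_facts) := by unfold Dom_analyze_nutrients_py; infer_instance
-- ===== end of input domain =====

-- B replaces A's per-key first-match if/elif cascade by keyword-major staged painting:
-- initialize every key to the default message, then one overwrite sweep per keyword in
-- reverse priority order (alternative decomposition, same cost).

-- ===== PORT A =====
-- the body of A's if/elif cascade, as a helper
def pvChainMsg (nutrient : String) : String :=
  if PySem.Str.isIn "sodium" (PySem.Str.lower nutrient) then
    "Essential for fluid balance, but excess can cause hypertension"
  else if PySem.Str.isIn "sugar" (PySem.Str.lower nutrient) then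
    "Provides energy but excess can lead to diabetes and obesity"
  else if PySem.Str.isIn "protein" (PySem.Str.lower nutrient) then
    "Essential for muscle and tissue repair"
  else if PySem.Str.isIn "fiber" (PySem.Str.lower nutrient) then
    "Important for digestive health and cholesterol management"
  else
    "Important for overall health and nutrition"

def analyze_nutrients_py (nutrition_facts : List (String × String)) : List (String × String) :=
  (nutrition_facts.foldl
    (fun analysis p => analysis.insert p.1 (pvChainMsg p.1))
    (PySem.Dict.empty : PySem.Dict String String)).items

-- ===== PORT B =====
def pvRules : List (String × String) :=
  [("sodium", "Essential for fluid balance, but excess can cause hypertension"),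
   ("sugar", "Provides energy but excess can lead to diabetes and obesity"),
   ("protein", "Essential for muscle and tissue repair"),
   ("fiber", "Important for digestive health and cholesterol management")]

def pvDefault : String := "Important for overall health and nutrition"

-- one rule's sweep: 'for name in analysis: if kw in name.lower(): analysis[name] = msg'
def pvSweep (d : PySem.Dict String String) (r : String × String) : PySem.Dict String String :=
  d.keys.foldl
    (fun d' name => if PySem.Str.isIn r.1 (PySem.Str.lower name) then d'.insert name r.2 else d') d

def analyze_nutrients_py_alt (nutrition_facts : List (String × String)) : List (String × String) :=
  -- analysis = dict.fromkeys(nutrition_facts, DEFAULT); for kw, msg in reversed(RULES): sweep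
  (pvRules.reverse.foldl pvSweep
    (nutrition_facts.foldl
      (fun d p => d.insert p.1 pvDefault)
      (PySem.Dict.empty : PySem.Dict String String))).items

-- ===== PRECONDITION & SPEC =====
def Spec_analyze_nutrients_py (nutrition_facts : List (String × String)) (out : List (String × String)) : Prop := out = analyze_nutrients_py_alt nutrition_facts
instance (nutrition_facts : List (String × String)) (out : List (String × String)) : Decidable (Spec_analyze_nutrients_py nutrition_facts out) := by unfold Spec_analyze_nutrients_py; infer_instance

-- ===== CLAIM (what is proved, stated in full; the proofs are below) =====
def Claim_equal_analyze_nutrients_py : Prop := ∀ (nutrition_facts : List (String × String)), Dom_analyze_nutrients_py nutrition_facts → Spec_analyze_nutrients_py nutrition_facts (analyze_nutrients_py nutrition_facts)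

-- ===== LEMMAS AND PROOFS =====

-- folding key-determined inserts: lookup afterwards
theorem pvGetD_foldl_insert_keyfun (f : String → String) (l : List (String × String))
    (d : PySem.Dict String String) (k dflt : String) :
    (l.foldl (fun d p => d.insert p.1 (f p.1)) d).getD k dflt
      = if k ∈ l.map Prod.fst then f k else d.getD k dflt := by
  induction l generalizing d with
  | nil => simp
  | cons p t ih =>
      rw [List.foldl_cons, ih]
      by_cases h : k ∈ t.map Prod.fst
      · simp [h]
      · simp only [List.map_cons, List.mem_cons, h, or_false, PySem.Dict.getD_insert]
        by_cases h2 : k = p.1 <;> simp [h2]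

-- a sweep over a nodup list of already-present keys maps the items pointwise
theorem pvSweep_items_aux (p : String → Bool) (m : String) :
    ∀ (L : List String) (d : PySem.Dict String String), L.Nodup →
    (∀ k ∈ L, d.contains k = true) →
    (L.foldl (fun d' k => if p k then d'.insert k m else d') d).items
      = d.items.map (fun e => if e.1 ∈ L ∧ p e.1 = true then (e.1, m) else e) := by
  intro L
  induction L with
  | nil => intro d _ _; simp
  | cons k L' ih =>
      intro d hnd hsub
      have hkL' : k ∉ L' := (List.nodup_cons.mp hnd).1
      have hndL' : L'.Nodup := (List.nodup_cons.mp hnd).2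
      have hk : d.contains k = true := hsub k (by simp)
      rw [List.foldl_cons]
      by_cases hp : p k = true
      · rw [if_pos hp]
        have hsub' : ∀ x ∈ L', (d.insert k m).contains x = true := by
          intro x hx
          rw [PySem.Dict.contains_insert]
          simp [hsub x (by simp [hx])]
        rw [ih (d.insert k m) hndL' hsub',
            PySem.Dict.items_insert_of_contains _ _ hk, List.map_map]
        apply List.map_congr_left
        intro e _
        by_cases hek : e.1 = k
        · subst hek
          simp [hkL', hp]
        · have : (e.1 == k) = false := by simp [hek]
          simp only [Function.comp, this, Bool.false_eq_true, if_false]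
          by_cases heL : e.1 ∈ L' <;> simp [heL, hek]
      · rw [if_neg hp]
        have hsub' : ∀ x ∈ L', d.contains x = true := fun x hx => hsub x (by simp [hx])
        rw [ih d hndL' hsub']
        apply List.map_congr_left
        intro e _
        by_cases hek : e.1 = k
        · subst hek; simp [hp]
        · by_cases heL : e.1 ∈ L' <;> simp [heL, hek]

-- one sweep step: what 'if kw in name.lower(): analysis[name] = msg' does to one entry
def pvStep (e r : String × String) : String × String :=
  if PySem.Str.isIn r.1 (PySem.Str.lower e.1) = true then (e.1, r.2) else e

-- the first-match message of a rule list (A's cascade, rule-list-indexed)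
def pvChainOf : List (String × String) → String → String → String
  | [], _, d => d
  | r :: rs, k, d =>
      if PySem.Str.isIn r.1 (PySem.Str.lower k) = true then r.2 else pvChainOf rs k d

theorem pvStep_fst (e r : String × String) : (pvStep e r).1 = e.1 := by
  unfold pvStep; split <;> rfl

-- a full sweep over d.keys applies pvStep to every item
theorem pvSweep_items (r : String × String) (d : PySem.Dict String String)
    (hnd : d.keys.Nodup) :
    (pvSweep d r).items = d.items.map (fun e => pvStep e r) := by
  unfold pvSweep
  rw [pvSweep_items_aux _ _ d.keys d hnd
      (fun k hk => (PySem.Dict.contains_iff_mem_keys d k).mpr hk)]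
  apply List.map_congr_left
  intro e he
  have hm : e.1 ∈ d.keys := PySem.Dict.mem_keys_of_mem_items d he
  unfold pvStep
  simp [hm]

theorem pvSweep_keys (r : String × String) (d : PySem.Dict String String)
    (hnd : d.keys.Nodup) : (pvSweep d r).keys = d.keys := by
  simp only [PySem.Dict.keys, pvSweep_items r d hnd, List.map_map]
  apply List.map_congr_left
  intro e _
  simp only [Function.comp_apply]
  exact pvStep_fst e r

theorem pvSweeps_items (rs : List (String × String)) :
    ∀ d : PySem.Dict String String, d.keys.Nodup →
    (rs.foldl pvSweep d).items = d.items.map (fun e => rs.foldl pvStep e) := by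
  induction rs with
  | nil => intro d _; simp
  | cons r rs ih =>
      intro d hnd
      have hnd' : (pvSweep d r).keys.Nodup := by rw [pvSweep_keys r d hnd]; exact hnd
      rw [List.foldl_cons, ih _ hnd', pvSweep_items r d hnd, List.map_map]
      apply List.map_congr_left
      intro e _
      simp only [Function.comp_apply, List.foldl_cons]

-- sweeping the reversed rule list computes the first-match message
theorem pvPaint_reverse (rs : List (String × String)) (k d : String) :
    rs.reverse.foldl pvStep (k, d) = (k, pvChainOf rs k d) := by
  induction rs with
  | nil => rfl
  | cons r rs ih =>
      rw [List.reverse_cons, List.foldl_append, ih]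
      simp [pvStep, pvChainOf]
      split <;> rfl

theorem pvPaint_point (k : String) :
    pvRules.reverse.foldl pvStep (k, pvDefault) = (k, pvChainMsg k) := by
  rw [pvPaint_reverse]
  rfl

-- ===== VERDICT (by name: the statement is the Claim_ definition above) =====
theorem analyze_nutrients_py_spec : Claim_equal_analyze_nutrients_py := by
  intro l _
  unfold Spec_analyze_nutrients_py analyze_nutrients_py analyze_nutrients_py_alt
  have hkA : (l.foldl (fun d p => d.insert p.1 (pvChainMsg p.1))
      (PySem.Dict.empty : PySem.Dict String String)).keys
      = PySem.Set.update (PySem.Dict.empty : PySem.Dict String String).keys (l.map Prod.fst) :=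
    PySem.Dict.keys_foldl_insert_key l Prod.fst _ _
  have hk0 : (l.foldl (fun d p => d.insert p.1 pvDefault)
      (PySem.Dict.empty : PySem.Dict String String)).keys
      = PySem.Set.update (PySem.Dict.empty : PySem.Dict String String).keys (l.map Prod.fst) :=
    PySem.Dict.keys_foldl_insert_key l Prod.fst _ _
  have hndE : (PySem.Dict.empty : PySem.Dict String String).keys.Nodup := by
    simp [PySem.Dict.keys_empty]
  have hndA : (l.foldl (fun d p => d.insert p.1 (pvChainMsg p.1))
      (PySem.Dict.empty : PySem.Dict String String)).keys.Nodup :=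
    PySem.Dict.nodup_keys_foldl_insert_key l Prod.fst (fun _ p => pvChainMsg p.1) _ hndE
  have hnd0 : (l.foldl (fun d p => d.insert p.1 pvDefault)
      (PySem.Dict.empty : PySem.Dict String String)).keys.Nodup :=
    PySem.Dict.nodup_keys_foldl_insert_key l Prod.fst (fun _ _ => pvDefault) _ hndE
  set K : List String := PySem.Set.update (PySem.Dict.empty : PySem.Dict String String).keys
      (l.map Prod.fst) with hK
  have hmemK : ∀ k ∈ K, k ∈ l.map Prod.fst := by
    intro k hk
    have : K = PySem.Set.ofList (l.map Prod.fst) := by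
      simp [hK, PySem.Dict.keys_empty]; rfl
    rw [this] at hk
    exact (PySem.Set.mem_ofList _ _).mp hk
  have hA : (l.foldl (fun d p => d.insert p.1 (pvChainMsg p.1))
      (PySem.Dict.empty : PySem.Dict String String)).items
      = K.map (fun k => (k, pvChainMsg k)) := by
    rw [PySem.Dict.items_eq_map_keys _ hndA pvDefault, hkA]
    apply List.map_congr_left
    intro k hk
    rw [pvGetD_foldl_insert_keyfun pvChainMsg l _ k pvDefault]
    simp [hmemK k hk]
  have h0 : (l.foldl (fun d p => d.insert p.1 pvDefault)
      (PySem.Dict.empty : PySem.Dict String String)).items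
      = K.map (fun k => (k, pvDefault)) := by
    rw [PySem.Dict.items_eq_map_keys _ hnd0 pvDefault, hk0]
    apply List.map_congr_left
    intro k hk
    rw [pvGetD_foldl_insert_keyfun (fun _ => pvDefault) l _ k pvDefault]
    simp
  rw [hA, pvSweeps_items pvRules.reverse _ hnd0, h0, List.map_map]
  apply List.map_congr_left
  intro k _
  simp only [Function.comp_apply]
  exact (pvPaint_point k).symm
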